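-- pv_equiv track=rewrite | github.com/SohamChhajed/SimpleRagApp | rag.py | extract_usage_stats
-- ===== SOURCE A (Python) =====
-- def extract_usage_stats(lm_usage):
--     if not lm_usage:
--         return {
--             "prompt_tokens": 0,
--             "completion_tokens": 0,
--             "total_tokens": 0
--         }
--
--     prompt = completion = total = 0
--
--     for _, stats in lm_usage.items():
--         prompt += stats.get("prompt_tokens", 0)
--         completion += stats.get("completion_tokens", 0)
--         total += stats.get("total_tokens", 0)
--
--     return {
--         "prompt_tokens": prompt,
--         "completion_tokens": completion,
--         "total_tokens": total
--     }
-- ===== SOURCE B (Python) =====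
-- def extract_usage_stats(lm_usage):
--     # Stage 1: merge every stats dict into one combined counter over ALL keys.
--     counts = {}
--     for stats in lm_usage.values():
--         for k, v in stats.items():
--             counts[k] = counts.get(k, 0) + v
--     # Stage 2: project the three token fields out of the merged counter.
--     return {k: counts.get(k, 0)
--             for k in ("prompt_tokens", "completion_tokens", "total_tokens")}
-- ===== Notes on version B (the rewrite author's own statement) =====
-- stated objective: alternative
-- what changed: Instead of one guarded pass probing three fixed keys into three scalar accumulators, B first merges all inner dicts into a single combined counter keyed by whatever keys occur (iterating the data's own items, not the fixed key list) and then projects the three token fields from that counter; no empty-input special case.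
import Mathlib
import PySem

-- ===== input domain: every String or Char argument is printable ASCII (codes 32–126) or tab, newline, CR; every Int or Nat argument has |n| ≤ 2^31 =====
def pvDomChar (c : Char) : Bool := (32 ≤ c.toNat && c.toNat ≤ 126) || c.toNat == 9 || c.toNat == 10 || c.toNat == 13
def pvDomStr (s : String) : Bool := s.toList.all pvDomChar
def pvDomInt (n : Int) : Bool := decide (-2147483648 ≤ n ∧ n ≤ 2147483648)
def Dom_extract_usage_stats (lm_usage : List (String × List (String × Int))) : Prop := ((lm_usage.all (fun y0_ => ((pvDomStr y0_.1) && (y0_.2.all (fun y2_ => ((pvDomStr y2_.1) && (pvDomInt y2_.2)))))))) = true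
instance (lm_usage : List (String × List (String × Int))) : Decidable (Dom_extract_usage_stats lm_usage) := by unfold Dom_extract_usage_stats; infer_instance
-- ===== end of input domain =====

-- B replaces A's guarded single pass probing three fixed keys into three scalar accumulators
-- by a two-stage plan: merge ALL inner items into one combined counter, then project the
-- three token fields (objective: alternative decomposition, same cost).

-- ===== PORT A =====
-- the loop body of A: one step over (prompt, completion, total)
def pvAStep (a : Int × Int × Int) (kv : String × List (String × Int)) : Int × Int × Int :=
  let stats : PySem.Dict String Int := PySem.Dict.mk kv.2
  (a.1 + stats.getD "prompt_tokens" 0,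
   a.2.1 + stats.getD "completion_tokens" 0,
   a.2.2 + stats.getD "total_tokens" 0)

def extract_usage_stats (lm_usage : List (String × List (String × Int))) : List (String × Int) :=
  if lm_usage.isEmpty then
    [("prompt_tokens", 0), ("completion_tokens", 0), ("total_tokens", 0)]
  else
    [("prompt_tokens", (lm_usage.foldl pvAStep (0, 0, 0)).1),
     ("completion_tokens", (lm_usage.foldl pvAStep (0, 0, 0)).2.1),
     ("total_tokens", (lm_usage.foldl pvAStep (0, 0, 0)).2.2)]

-- ===== PORT B =====
-- B's inner loop: `for k, v in stats.items(): counts[k] = counts.get(k, 0) + v`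
def pvMerge (d : PySem.Dict String Int) (stats : List (String × Int)) : PySem.Dict String Int :=
  stats.foldl (fun d kv => d.insert kv.1 (d.getD kv.1 0 + kv.2)) d

def extract_usage_stats_alt (lm_usage : List (String × List (String × Int))) : List (String × Int) :=
  let counts := lm_usage.foldl (fun d kv => pvMerge d kv.2) PySem.Dict.empty
  ["prompt_tokens", "completion_tokens", "total_tokens"].map (fun k => (k, counts.getD k 0))

-- ===== PRECONDITION & SPEC =====
-- Pre_ excludes association lists whose inner key lists contain duplicates: a Python dict can
-- never hold duplicate keys, so no Python input is excluded; on such Lean-only lists A reads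
-- only the first occurrence per key while B sums all occurrences.
def Pre_extract_usage_stats (lm_usage : List (String × List (String × Int))) : Prop :=
  ∀ kv ∈ lm_usage, (kv.2.map Prod.fst).Nodup
instance (lm_usage : List (String × List (String × Int))) : Decidable (Pre_extract_usage_stats lm_usage) := by unfold Pre_extract_usage_stats; infer_instance
def pvWitness_extract_usage_stats : (List (String × List (String × Int))) :=
  [("step1", [("prompt_tokens", 3), ("completion_tokens", 4), ("total_tokens", 7)]),
   ("step2", [("total_tokens", 5)])]

def Spec_extract_usage_stats (lm_usage : List (String × List (String × Int))) (out : List (String × Int)) : Prop := out = extract_usage_stats_alt lm_usage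
instance (lm_usage : List (String × List (String × Int))) (out : List (String × Int)) : Decidable (Spec_extract_usage_stats lm_usage out) := by unfold Spec_extract_usage_stats; infer_instance

-- ===== CLAIM =====
def Claim_equal_extract_usage_stats : Prop := ∀ (lm_usage : List (String × List (String × Int))), Dom_extract_usage_stats lm_usage → Pre_extract_usage_stats lm_usage → Spec_extract_usage_stats lm_usage (extract_usage_stats lm_usage)

-- ===== LEMMAS AND PROOFS =====

-- the sum of the values attached to key k in an association list
def pvSumKey (k : String) (l : List (String × Int)) : Int :=
  ((l.filter (fun p => p.1 = k)).map Prod.snd).sum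

lemma pvSumKey_of_not_mem (k : String) (l : List (String × Int))
    (h : k ∉ l.map Prod.fst) : pvSumKey k l = 0 := by
  induction l with
  | nil => rfl
  | cons p rest ih =>
      simp only [List.map_cons, List.mem_cons] at h
      push Not at h
      simp only [pvSumKey, List.filter_cons, decide_eq_true_eq, Ne.symm h.1, if_false]
      exact ih h.2

-- one merged-counter pass over stats adds pvSumKey to every lookup
lemma pvMerge_getD (l : List (String × Int)) (d : PySem.Dict String Int) (k : String) :
    (pvMerge d l).getD k 0 = d.getD k 0 + pvSumKey k l := by
  induction l generalizing d with
  | nil => simp [pvMerge, pvSumKey]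
  | cons p rest ih =>
      simp only [pvMerge, List.foldl_cons] at *
      rw [ih]
      rw [PySem.Dict.getD_insert]
      by_cases hk : k = p.1
      · subst hk
        simp [pvSumKey]
        ring
      · simp [pvSumKey, Ne.symm hk, hk]

-- with distinct inner keys, summing all occurrences equals A's first-match lookup
lemma pvSumKey_eq_getD (k : String) (l : List (String × Int))
    (h : (l.map Prod.fst).Nodup) :
    pvSumKey k l = (PySem.Dict.mk l).getD k 0 := by
  induction l with
  | nil => simp [pvSumKey, PySem.Dict.getD, PySem.Dict.get?]
  | cons p rest ih =>
      simp only [List.map_cons, List.nodup_cons] at h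
      rw [PySem.Dict.getD_eq_get?_getD, PySem.Dict.get?_mk_cons]
      by_cases hk : p.1 = k
      · subst hk
        have h0 : pvSumKey p.1 rest = 0 := pvSumKey_of_not_mem _ _ h.1
        simp only [pvSumKey, List.filter_cons, decide_eq_true_eq, List.map_cons,
          List.sum_cons, beq_self_eq_true, if_true, Option.getD_some]
        simpa [pvSumKey] using h0
      · simp only [beq_iff_eq, hk, if_false]
        rw [← PySem.Dict.getD_eq_get?_getD, ← ih h.2]
        simp [pvSumKey, hk]

-- B's outer fold accumulates, per key, the same per-entry contributions A reads
lemma pvFoldMerge_getD (lm : List (String × List (String × Int)))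
    (d : PySem.Dict String Int) (k : String)
    (h : ∀ kv ∈ lm, (kv.2.map Prod.fst).Nodup) :
    (lm.foldl (fun d kv => pvMerge d kv.2) d).getD k 0
      = d.getD k 0 + (lm.map (fun kv => (PySem.Dict.mk kv.2).getD k 0)).sum := by
  induction lm generalizing d with
  | nil => simp
  | cons kv rest ih =>
      simp only [List.foldl_cons, List.map_cons, List.sum_cons]
      rw [ih _ (fun x hx => h x (List.mem_cons_of_mem _ hx)), pvMerge_getD,
          pvSumKey_eq_getD k kv.2 (h kv (List.mem_cons_self ..))]
      ring

-- A's fold computes exactly those three per-key sums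
lemma pvAFold (lm : List (String × List (String × Int))) (p c t : Int) :
    lm.foldl pvAStep (p, c, t)
      = (p + (lm.map (fun kv => (PySem.Dict.mk kv.2).getD "prompt_tokens" 0)).sum,
         c + (lm.map (fun kv => (PySem.Dict.mk kv.2).getD "completion_tokens" 0)).sum,
         t + (lm.map (fun kv => (PySem.Dict.mk kv.2).getD "total_tokens" 0)).sum) := by
  induction lm generalizing p c t with
  | nil => simp
  | cons kv rest ih =>
      simp only [List.foldl_cons, List.map_cons, List.sum_cons, pvAStep]
      rw [ih]
      congr 1 <;> [ring; congr 1] <;> ring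

-- ===== VERDICT =====
theorem extract_usage_stats_spec : Claim_equal_extract_usage_stats := by
  intro lm _ hpre
  unfold Spec_extract_usage_stats extract_usage_stats extract_usage_stats_alt
  simp only [List.map_cons, List.map_nil]
  rw [pvFoldMerge_getD _ _ _ hpre, pvFoldMerge_getD _ _ _ hpre, pvFoldMerge_getD _ _ _ hpre]
  cases lm with
  | nil => simp
  | cons kv rest =>
      rw [if_neg (by simp), pvAFold]
      simp
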